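-- pv_equiv track=rewrite | github.com/SBN-ALCF/sbnd_parsl | sbnd_parsl/utils.py | aurora_affinity
-- ===== SOURCE A (Python) =====
-- def aurora_affinity(per_worker: int=1, ncpus: int=-1):
--     """Return parsl CPU affinity list for aurora, pairing physical & virtual cores and excluding CPUs 0 and 52."""
--     if per_worker < 1:
--         per_worker = 1
--
--     cpus = [i for i in range(1, 104) if i != 52]
--     if ncpus > 0:
--         cpus = cpus[0:ncpus]
--     cpu_groups = [cpus[i:i + per_worker] for i in range(0, len(cpus), per_worker)]
--
--     return 'list:' + ':'.join([
--         ','.join([f'{cpu},{cpu+104}' for cpu in group]) for group in cpu_groups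
--     ])
-- ===== SOURCE B (Python) =====
-- def aurora_affinity(per_worker: int = 1, ncpus: int = -1):
--     """Return parsl CPU affinity list for aurora, pairing physical & virtual cores and excluding CPUs 0 and 52."""
--     step = max(per_worker, 1)
--     cpus = [c for c in range(1, 104) if c != 52]
--     if ncpus > 0:
--         cpus = cpus[:ncpus]
--     parts = []
--     for i, c in enumerate(cpus):
--         if i == 0:
--             sep = ''
--         elif i % step == 0:
--             sep = ':'
--         else:
--             sep = ','
--         parts.append(f'{sep}{c},{c+104}')
--     return 'list:' + ''.join(parts)
-- ===== Notes on version B (the rewrite author's own statement) =====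
-- stated objective: alternative
-- what changed: Replaces A's two-level decomposition (slice the CPU list into per_worker groups, then nested ','-joins joined by ':') with a single flat pass over the enumerated CPU list that picks each token's separator ('' / ':' / ',') from its index modulo per_worker.
import Mathlib
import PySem

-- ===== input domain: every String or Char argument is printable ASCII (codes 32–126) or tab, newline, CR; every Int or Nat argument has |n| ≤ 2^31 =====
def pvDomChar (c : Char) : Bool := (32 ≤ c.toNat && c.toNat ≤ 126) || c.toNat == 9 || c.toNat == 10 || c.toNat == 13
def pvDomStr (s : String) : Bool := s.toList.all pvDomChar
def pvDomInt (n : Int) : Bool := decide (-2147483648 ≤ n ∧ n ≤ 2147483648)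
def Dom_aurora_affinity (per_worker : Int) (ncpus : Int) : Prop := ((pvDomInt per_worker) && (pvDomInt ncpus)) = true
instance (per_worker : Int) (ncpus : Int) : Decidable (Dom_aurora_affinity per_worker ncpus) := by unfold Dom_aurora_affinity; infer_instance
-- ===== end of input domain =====

-- B replaces A's two-level grouping (slice into cpu_groups, then nested ':'/',' joins) by a single
-- indexed pass over the CPU list choosing each token's separator from its position (alternative decomposition).

-- ===== PORT A =====
def aurora_affinity (per_worker : Int) (ncpus : Int) : String :=
  let pw := if per_worker < 1 then (1 : Int) else per_worker
  let cpus0 := (PySem.List.pyRange 1 104 1).filter (fun i => i != 52)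
  let cpus := if ncpus > 0 then PySem.List.slice cpus0 (some 0) (some ncpus) else cpus0
  let cpu_groups := (PySem.List.pyRange 0 (PySem.List.len cpus) pw).map
    (fun i => PySem.List.slice cpus (some i) (some (i + pw)))
  "list:" ++ PySem.Str.join ":" (cpu_groups.map (fun group =>
    PySem.Str.join "," (group.map (fun cpu =>
      PySem.Int.toStr cpu ++ "," ++ PySem.Int.toStr (cpu + 104)))))

-- ===== PORT B =====
def aurora_affinity_alt (per_worker : Int) (ncpus : Int) : String :=
  let step := max per_worker 1
  let cpus0 := (PySem.List.pyRange 1 104 1).filter (fun c => c != 52)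
  let cpus := if ncpus > 0 then PySem.List.slice cpus0 none (some ncpus) else cpus0
  let parts := (PySem.List.enumerate cpus).map (fun ic =>
    (if ic.1 = 0 then "" else if PySem.Int.mod ic.1 step = 0 then ":" else ",") ++
      PySem.Int.toStr ic.2 ++ "," ++ PySem.Int.toStr (ic.2 + 104))
  "list:" ++ PySem.Str.join "" parts

-- ===== PRECONDITION & SPEC =====
def Spec_aurora_affinity (per_worker : Int) (ncpus : Int) (out : String) : Prop := out = aurora_affinity_alt per_worker ncpus
instance (per_worker : Int) (ncpus : Int) (out : String) : Decidable (Spec_aurora_affinity per_worker ncpus out) := by unfold Spec_aurora_affinity; infer_instance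

-- ===== CLAIM (what is proved, stated in full; the proofs are below) =====
def Claim_equal_aurora_affinity : Prop := ∀ (per_worker : Int) (ncpus : Int), Dom_aurora_affinity per_worker ncpus → Spec_aurora_affinity per_worker ncpus (aurora_affinity per_worker ncpus)

-- ===== LEMMAS AND PROOFS =====

-- token for one cpu, on the char level
def pvTok (c : Int) : List Char := PySem.Int.toChars c ++ ',' :: PySem.Int.toChars (c + 104)

-- the chunk decomposition A's range/slice comprehension produces (p ≥ 1)
def pvChunks (p : Nat) : List Int → List (List Int)
  | [] => []
  | x :: rest => (x :: rest.take (p - 1)) :: pvChunks p (rest.drop (p - 1))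
  termination_by xs => xs.length
  decreasing_by simp

def pvBody (g : List Int) : List Char := (g.map (fun c => ',' :: pvTok c)).flatten

def pvCatTok (g : List Int) : List Char := PySem.Chars.join [','] (g.map pvTok)

-- B's tail pass: tokens at positions s, s+1, … with ':' at multiples of p, ',' otherwise
def pvT (p : Nat) (s : Nat) : List Int → List Char
  | [] => []
  | c :: cs => (if s % p = 0 then [':'] else [',']) ++ pvTok c ++ pvT p (s + 1) cs

lemma pvChunks_nil (p : Nat) : pvChunks p [] = [] := by simp [pvChunks]

lemma pvChunks_cons (p : Nat) (x : Int) (rest : List Int) :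
    pvChunks p (x :: rest) = (x :: rest.take (p - 1)) :: pvChunks p (rest.drop (p - 1)) := by
  rw [pvChunks.eq_def]

lemma pv_join_empty (l : List (List Char)) : PySem.Chars.join [] l = l.flatten := by
  induction l with
  | nil => simp [PySem.Chars.join_nil]
  | cons a t ih =>
    cases t with
    | nil => simp [PySem.Chars.join_singleton]
    | cons b r => rw [PySem.Chars.join_cons_cons]; simp [ih]

lemma pv_join_colon (c : List Char) (cs : List (List Char)) :
    PySem.Chars.join [':'] (c :: cs) = c ++ (cs.map (fun x => ':' :: x)).flatten := by
  induction cs generalizing c with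
  | nil => simp [PySem.Chars.join_singleton]
  | cons b r ih => rw [PySem.Chars.join_cons_cons, ih b]; simp

lemma pv_catTok_cons (c : Int) (g : List Int) : pvCatTok (c :: g) = pvTok c ++ pvBody g := by
  induction g generalizing c with
  | nil => simp [pvCatTok, pvBody, PySem.Chars.join_singleton]
  | cons b r ih =>
    simp only [pvCatTok, List.map_cons] at *
    rw [PySem.Chars.join_cons_cons, ih b]
    simp [pvBody]

lemma pv_T_shift (p : Nat) (ys : List Int) : ∀ s, pvT p (s + p) ys = pvT p s ys := by
  induction ys with
  | nil => intro s; rfl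
  | cons c cs ih =>
    intro s
    simp only [pvT, Nat.add_mod_right]
    rw [show s + p + 1 = (s + 1) + p by omega, ih (s + 1)]

lemma pv_T_split (p : Nat) (ys : List Int) :
    ∀ s, 1 ≤ s → s ≤ p → pvT p s ys = pvBody (ys.take (p - s)) ++ pvT p 0 (ys.drop (p - s)) := by
  induction ys with
  | nil => intro s _ _; simp [pvT, pvBody]
  | cons c cs ih =>
    intro s hs1 hsp
    by_cases hs : s = p
    · rw [hs, Nat.sub_self, List.take_zero, List.drop_zero]
      have h := pv_T_shift p (c :: cs) 0
      simp only [Nat.zero_add] at h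
      simp [pvBody, h]
    · have hlt : s < p := lt_of_le_of_ne hsp hs
      have hmod : s % p = s := Nat.mod_eq_of_lt hlt
      have hsz : s ≠ 0 := by omega
      obtain ⟨t, ht⟩ : ∃ t, p - s = t + 1 := ⟨p - s - 1, by omega⟩
      rw [ht, List.take_succ_cons, List.drop_succ_cons]
      simp only [pvT, hmod, if_neg hsz, pvBody, List.map_cons, List.flatten_cons]
      rw [ih (s + 1) (by omega) (by omega), show p - (s + 1) = t by omega]
      simp [pvBody]

lemma pv_T_chunks (p : Nat) (hp : 1 ≤ p) :
    ∀ (n : Nat) (ys : List Int), ys.length ≤ n →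
      pvT p 0 ys = ((pvChunks p ys).map (fun g => ':' :: pvCatTok g)).flatten := by
  intro n
  induction n with
  | zero => intro ys h; simp at h; subst h; simp [pvT, pvChunks_nil]
  | succ m ih =>
    intro ys hlen
    cases ys with
    | nil => simp [pvT, pvChunks_nil]
    | cons c cs =>
      have h0 : (0 : Nat) % p = 0 := Nat.zero_mod p
      simp only [pvT, h0]
      rw [pv_T_split p cs 1 (le_refl _) hp]
      rw [ih (cs.drop (p - 1)) (by simp at hlen ⊢; omega)]
      rw [pvChunks_cons]
      simp only [List.map_cons, List.flatten_cons]
      rw [pv_catTok_cons]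
      simp

-- A's cpu_groups, in canonical take/drop form
lemma pv_range_count (p : Nat) (hp : 1 ≤ p) (L : Nat) :
    PySem.List.pyRange 0 (L : Int) (p : Int) =
      (List.range ((L + p - 1) / p)).map (fun k => ((p * k : Nat) : Int)) := by
  rw [PySem.List.pyRange_of_pos 0 (L : Int) (by exact_mod_cast hp)]
  by_cases hL : 0 < L
  · have h1 : ((L : Int) - 0 + (p : Int) - 1) = ((L + p - 1 : Nat) : Int) := by omega
    rw [if_pos (by exact_mod_cast hL), h1]
    rw [show ((L + p - 1 : Nat) : Int) / (p : Int) = (((L + p - 1) / p : Nat) : Int) from (Int.natCast_ediv _ _).symm]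
    simp only [Int.toNat_natCast]
    congr 1
    funext k
    push_cast
    ring
  · have hL0 : L = 0 := by omega
    subst hL0
    rw [if_neg (by simp)]
    rw [show (0 + p - 1) / p = 0 from Nat.div_eq_of_lt (by omega)]
    simp

lemma pv_chunks_eq (p : Nat) (hp : 1 ≤ p) :
    ∀ (n : Nat) (xs : List Int), xs.length ≤ n →
      (List.range ((xs.length + p - 1) / p)).map (fun k => (xs.drop (p * k)).take p) = pvChunks p xs := by
  intro n
  induction n with
  | zero => intro xs h; simp at h; subst h; rw [pvChunks_nil]; simp; omega
  | succ m ih =>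
    intro xs hlen
    cases xs with
    | nil => rw [pvChunks_nil]; simp; omega
    | cons x rest =>
      have hcount : ((x :: rest).length + p - 1) / p = rest.length / p + 1 := by
        rw [show (x :: rest).length + p - 1 = rest.length + p by simp]
        exact Nat.add_div_right _ (by omega)
      rw [hcount, List.range_succ_eq_map, List.map_cons, List.map_map]
      have hhead : ((x :: rest).drop (p * 0)).take p = x :: rest.take (p - 1) := by
        obtain ⟨t, ht⟩ : ∃ t, p = t + 1 := ⟨p - 1, by omega⟩
        rw [Nat.mul_zero, List.drop_zero, ht, List.take_succ_cons, show t + 1 - 1 = t by omega]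
      have htail : ∀ k : Nat, ((x :: rest).drop (p * (k + 1))).take p
          = ((rest.drop (p - 1)).drop (p * k)).take p := by
        intro k
        congr 1
        rw [List.drop_drop, Nat.mul_succ, show p * k + p = (p - 1 + p * k) + 1 by omega,
          List.drop_succ_cons]
      have hdiv : rest.length / p = ((rest.drop (p - 1)).length + p - 1) / p := by
        rw [List.length_drop]
        by_cases hc : p - 1 ≤ rest.length
        · rw [show rest.length - (p - 1) + p - 1 = rest.length by omega]
        · rw [show rest.length - (p - 1) = 0 by omega]
          rw [Nat.div_eq_of_lt (by omega), Nat.div_eq_of_lt (by omega)]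
      rw [pvChunks_cons, ← hhead]
      congr 1
      calc (List.range (rest.length / p)).map ((fun k => ((x :: rest).drop (p * k)).take p) ∘ Nat.succ)
          = (List.range (rest.length / p)).map (fun k => ((rest.drop (p - 1)).drop (p * k)).take p) := by
            apply List.map_congr_left; intro k _; exact htail k
        _ = pvChunks p (rest.drop (p - 1)) := by
            rw [hdiv]; exact ih _ (by simp only [List.length_drop]; simp at hlen; omega)

-- B's tail pass over zipIdx with start ≥ 1 is pvT
lemma pv_zip_T (p : Nat) (ys : List Int) :
    ∀ s : Nat, 1 ≤ s →
      ((ys.zipIdx s).map (fun q => (if q.2 = 0 then ([] : List Char) else if q.2 % p = 0 then [':'] else [',']) ++ pvTok q.1)).flatten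
        = pvT p s ys := by
  induction ys with
  | nil => intro s _; rfl
  | cons c cs ih =>
    intro s hs
    rw [List.zipIdx_cons, List.map_cons, List.flatten_cons, pvT]
    rw [if_neg (by omega), ih (s + 1) (by omega)]

-- the whole string after 'list:' on the char level, A-form = B-form, nonempty case
lemma pv_main (p : Nat) (hp : 1 ≤ p) (x : Int) (rest : List Int) :
    PySem.Chars.join [':'] ((pvChunks p (x :: rest)).map pvCatTok) = pvTok x ++ pvT p 1 rest := by
  rw [pvChunks_cons, List.map_cons, pv_join_colon, List.map_map]
  rw [show ((fun x => ':' :: x) ∘ pvCatTok) = (fun g => ':' :: pvCatTok g) from rfl]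
  rw [← pv_T_chunks p hp (rest.drop (p - 1)).length _ (le_refl _)]
  rw [pv_catTok_cons, List.append_assoc, ← pv_T_split p rest 1 (le_refl _) hp]

-- the two ports' payload strings, as functions of the chunk width and the cpu list
def pvAstr (p : Nat) (cpus : List Int) : String :=
  PySem.Str.join ":" (((PySem.List.pyRange 0 (PySem.List.len cpus) (p : Int)).map
      (fun i => PySem.List.slice cpus (some i) (some (i + (p : Int))))).map
    (fun group => PySem.Str.join "," (group.map (fun cpu =>
      PySem.Int.toStr cpu ++ "," ++ PySem.Int.toStr (cpu + 104)))))

def pvBstr (p : Nat) (cpus : List Int) : String :=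
  PySem.Str.join "" ((PySem.List.enumerate cpus).map (fun ic =>
    (if ic.1 = 0 then "" else if PySem.Int.mod ic.1 (p : Int) = 0 then ":" else ",") ++
      PySem.Int.toStr ic.2 ++ "," ++ PySem.Int.toStr (ic.2 + 104)))

-- A's nested-join side, on the char level, is the join over pvChunks
lemma pv_A_side (p : Nat) (hp : 1 ≤ p) (cpus : List Int) :
    (pvAstr p cpus).toList = PySem.Chars.join [':'] ((pvChunks p cpus).map pvCatTok) := by
  unfold pvAstr
  have hgroups : (PySem.List.pyRange 0 (PySem.List.len cpus) (p : Int)).map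
      (fun i => PySem.List.slice cpus (some i) (some (i + (p : Int))))
      = pvChunks p cpus := by
    rw [PySem.List.len_eq, pv_range_count p hp cpus.length, List.map_map]
    rw [← pv_chunks_eq p hp cpus.length cpus (le_refl _)]
    apply List.map_congr_left
    intro k _
    exact PySem.List.slice_natCast_add cpus (p * k) p
  rw [hgroups, PySem.Str.toList_join, List.map_map]
  congr 1
  apply List.map_congr_left
  intro g _
  show (PySem.Str.join "," (g.map (fun cpu =>
      PySem.Int.toStr cpu ++ "," ++ PySem.Int.toStr (cpu + 104)))).toList = pvCatTok g
  rw [PySem.Str.toList_join, pvCatTok, List.map_map]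
  congr 1
  apply List.map_congr_left
  intro c _
  show (PySem.Int.toStr c ++ "," ++ PySem.Int.toStr (c + 104)).toList = pvTok c
  simp [String.toList_append, PySem.Int.toList_toStr, pvTok]

-- B's flat indexed side, on the char level
lemma pv_B_side (p : Nat) (cpus : List Int) :
    (pvBstr p cpus).toList = (cpus.zipIdx.map (fun q =>
        (if q.2 = 0 then ([] : List Char) else if q.2 % p = 0 then [':'] else [',']) ++ pvTok q.1)).flatten := by
  unfold pvBstr
  rw [PySem.Str.toList_join, show ("" : String).toList = ([] : List Char) from rfl,
    pv_join_empty, List.map_map]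
  rw [PySem.List.enumerate_eq_zipIdx_map, List.map_map]
  congr 1
  apply List.map_congr_left
  intro q _
  show ((if ((0 : Int) + (q.2 : Int) = 0) then ("" : String) else if PySem.Int.mod ((0 : Int) + (q.2 : Int)) (p : Int) = 0 then ":" else ",") ++
      PySem.Int.toStr q.1 ++ "," ++ PySem.Int.toStr (q.1 + 104)).toList
    = (if q.2 = 0 then ([] : List Char) else if q.2 % p = 0 then [':'] else [',']) ++ pvTok q.1
  rw [Int.zero_add, PySem.Int.mod_natCast]
  simp only [String.toList_append, apply_ite String.toList, Nat.cast_eq_zero]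
  norm_cast
  simp [PySem.Int.toList_toStr, pvTok]

-- the two ports' payloads agree for every cpu list and every chunk width p ≥ 1
lemma pv_core (p : Nat) (hp : 1 ≤ p) (cpus : List Int) : pvAstr p cpus = pvBstr p cpus := by
  refine String.toList_inj.mp ?_
  rw [pv_A_side p hp cpus, pv_B_side p cpus]
  cases cpus with
  | nil => simp [pvChunks_nil, PySem.Chars.join_nil]
  | cons x rest =>
    rw [pv_main p hp x rest, List.zipIdx_cons, List.map_cons, List.flatten_cons]
    rw [if_pos rfl, pv_zip_T p rest 1 (le_refl _)]
    simp

-- ===== VERDICT (by name: the statement is the Claim_ definition above) =====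
theorem aurora_affinity_spec : Claim_equal_aurora_affinity := by
  intro per_worker ncpus _
  unfold Spec_aurora_affinity aurora_affinity aurora_affinity_alt
  simp only []
  have hpw : (if per_worker < 1 then (1 : Int) else per_worker) = max per_worker 1 := by
    rw [max_def]; split_ifs <;> omega
  rw [hpw, PySem.List.slice_zero_start]
  have hmax : (1 : Int) ≤ max per_worker 1 := le_max_right _ _
  have hcast : ((max per_worker 1).toNat : Int) = max per_worker 1 := Int.toNat_of_nonneg (by omega)
  rw [← hcast]
  congr 1
  show pvAstr (max per_worker 1).toNat _ = pvBstr (max per_worker 1).toNat _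
  exact pv_core (max per_worker 1).toNat (by omega) _
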